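-- pv_equiv track=rewrite | github.com/teaishealthy/aoc25 | days/4/main.py | evaluate_grid
-- ===== SOURCE A (Python) =====
-- from typing import Sequence
--
-- EMPTY = "."
--
-- ROLL = "@"
--
-- Grid = Sequence[Sequence[str]]
--
-- def index_or_zero(x: int, y: int, grid: Grid) -> str:
--     if 0 <= y < len(grid) and 0 <= x < len(grid[0]):
--         return grid[y][x]
--     return EMPTY
--
-- def get_surrounding_positions(x: int, y: int, grid: Grid) -> int:
--     positions = [
--         (x - 1, y),
--         (x + 1, y),
--         (x, y - 1),
--         (x, y + 1),
--         (x - 1, y - 1),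
--         (x - 1, y + 1),
--         (x + 1, y - 1),
--         (x + 1, y + 1),
--     ]
--
--     count = 0
--     for pos_x, pos_y in positions:
--         if index_or_zero(pos_x, pos_y, grid) == ROLL:
--             count += 1
--     return count
--
-- def evaluate_grid(grid: Sequence[Sequence[str]]) -> int:
--     count = 0
--     for x, _ in enumerate(grid[0]):
--         for y, _ in enumerate(grid):
--             if index_or_zero(x, y, grid) != ROLL:
--                 continue
--             surrounding_rolls = get_surrounding_positions(x, y, grid)
--             if surrounding_rolls < 4:
--                 count += 1
--     return count
-- ===== SOURCE B (Python) =====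
-- def evaluate_grid(grid):
--     w = len(grid[0])
--     h = len(grid)
--     rolls = [(x, y) for x in range(w) for y in range(h) if grid[y][x] == "@"]
--     count = 0
--     for (x, y) in rolls:
--         adjacent = sum(1 for (qx, qy) in rolls if max(abs(qx - x), abs(qy - y)) == 1)
--         if adjacent < 4:
--             count += 1
--     return count
-- ===== Notes on version B (the rewrite author's own statement) =====
-- stated objective: alternative
-- what changed: B collects the roll positions into one list in a single pass and, for each roll, counts its neighbours by scanning that roll list (Chebyshev distance 1), instead of A's per-cell gathering that does 8 bounds-checked grid reads through index_or_zero for every roll.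
import Mathlib
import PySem

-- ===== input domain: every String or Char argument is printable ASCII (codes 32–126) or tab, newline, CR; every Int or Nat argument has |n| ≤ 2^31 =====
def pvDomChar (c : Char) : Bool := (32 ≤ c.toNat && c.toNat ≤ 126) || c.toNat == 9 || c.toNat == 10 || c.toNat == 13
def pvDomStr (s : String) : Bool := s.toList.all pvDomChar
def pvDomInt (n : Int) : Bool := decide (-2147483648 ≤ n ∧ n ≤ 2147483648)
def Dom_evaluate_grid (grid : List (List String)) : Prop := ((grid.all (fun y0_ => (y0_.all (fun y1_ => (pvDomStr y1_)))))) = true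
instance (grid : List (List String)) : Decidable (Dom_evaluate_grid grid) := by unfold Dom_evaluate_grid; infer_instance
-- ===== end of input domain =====

-- B gathers the roll positions once and counts neighbours among that list, instead of A's
-- per-cell bounds-checked reads of all 8 neighbours; proved equal on non-empty grids whose
-- rows are at least as long as row 0 (elsewhere the Python A raises IndexError).

-- ===== PORT A =====
def index_or_zero (x y : Int) (grid : List (List String)) : String :=
  if 0 ≤ y ∧ y < (grid.length : Int) ∧ 0 ≤ x ∧ x < ((PySem.List.pyGetD grid 0 []).length : Int) then
    PySem.List.pyGetD (PySem.List.pyGetD grid y []) x "."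
  else "."

def get_surrounding_positions (x y : Int) (grid : List (List String)) : Int :=
  let positions : List (Int × Int) :=
    [(x-1, y), (x+1, y), (x, y-1), (x, y+1), (x-1, y-1), (x-1, y+1), (x+1, y-1), (x+1, y+1)]
  positions.foldl (fun count pos => if index_or_zero pos.1 pos.2 grid = "@" then count + 1 else count) 0

def evaluate_grid (grid : List (List String)) : Int :=
  (PySem.List.enumerate (PySem.List.pyGetD grid 0 []) 0).foldl (fun count xp =>
    (PySem.List.enumerate grid 0).foldl (fun count yp =>
      if index_or_zero xp.1 yp.1 grid ≠ "@" then count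
      else if get_surrounding_positions xp.1 yp.1 grid < 4 then count + 1 else count) count) 0

-- ===== PORT B =====
def evaluate_grid_alt (grid : List (List String)) : Int :=
  let w : Int := ((PySem.List.pyGetD grid 0 []).length : Int)
  let h : Int := (grid.length : Int)
  let rolls : List (Int × Int) :=
    (PySem.List.pyRange 0 w 1).flatMap (fun x =>
      (PySem.List.pyRange 0 h 1).filterMap (fun y =>
        if PySem.List.pyGetD (PySem.List.pyGetD grid y []) x "" = "@" then some (x, y) else none))
  rolls.foldl (fun count p =>
    if (rolls.foldl (fun adjacent q =>
          if max |q.1 - p.1| |q.2 - p.2| = (1 : Int) then adjacent + 1 else adjacent) (0 : Int)) < 4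
    then count + 1 else count) 0

-- ===== PRECONDITION & SPEC =====
-- Pre_ excludes exactly the inputs where the Python A raises IndexError: the empty grid
-- (grid[0]) and ragged grids with some row shorter than row 0 (grid[y][x] on a short row).
def Pre_evaluate_grid (grid : List (List String)) : Prop :=
  grid ≠ [] ∧ ∀ row ∈ grid, (PySem.List.pyGetD grid 0 []).length ≤ row.length
instance (grid : List (List String)) : Decidable (Pre_evaluate_grid grid) := by
  unfold Pre_evaluate_grid; infer_instance
def pvWitness_evaluate_grid : List (List String) := [["@", "."], [".", "@"]]

def Spec_evaluate_grid (grid : List (List String)) (out : Int) : Prop := out = evaluate_grid_alt grid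
instance (grid : List (List String)) (out : Int) : Decidable (Spec_evaluate_grid grid out) := by
  unfold Spec_evaluate_grid; infer_instance

-- ===== CLAIM (what is proved, stated in full; the proofs are below) =====
def Claim_equal_evaluate_grid : Prop := ∀ (grid : List (List String)), Dom_evaluate_grid grid → Pre_evaluate_grid grid → Spec_evaluate_grid grid (evaluate_grid grid)

-- ===== LEMMAS AND PROOFS =====

-- the cell predicate B tests, the roll list B builds, and the 8-neighbour list of a position
abbrev pvP (grid : List (List String)) (p : Int × Int) : Prop :=
  PySem.List.pyGetD (PySem.List.pyGetD grid p.2 []) p.1 "" = "@"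

def pvRolls (grid : List (List String)) : List (Int × Int) :=
  (PySem.List.pyRange 0 ((PySem.List.pyGetD grid 0 []).length : Int) 1).flatMap (fun x =>
    (PySem.List.pyRange 0 (grid.length : Int) 1).filterMap (fun y =>
      if PySem.List.pyGetD (PySem.List.pyGetD grid y []) x "" = "@" then some (x, y) else none))

def pvNbrs (p : Int × Int) : List (Int × Int) :=
  [(p.1-1, p.2), (p.1+1, p.2), (p.1, p.2-1), (p.1, p.2+1),
   (p.1-1, p.2-1), (p.1-1, p.2+1), (p.1+1, p.2-1), (p.1+1, p.2+1)]

theorem pvAdj_iff (p q : Int × Int) :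
    (max |q.1 - p.1| |q.2 - p.2| = (1 : Int)) ↔ q ∈ pvNbrs p := by
  obtain ⟨a, b⟩ := p; obtain ⟨c, d⟩ := q
  simp only [pvNbrs, List.mem_cons, List.not_mem_nil, or_false, Prod.mk.injEq]
  simp only [Int.abs_eq_natAbs]
  omega

theorem pvNbrs_nodup (p : Int × Int) : (pvNbrs p).Nodup := by
  obtain ⟨a, b⟩ := p
  simp [pvNbrs, Prod.ext_iff]
  omega

theorem pvFilterIfMap {α β : Type} (p : α → Prop) [DecidablePred p] (g : α → β) (l : List α) :
    l.filterMap (fun a => if p a then some (g a) else none) =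
      (l.filter (fun a => decide (p a))).map g := by
  induction l with
  | nil => rfl
  | cons a t ih => by_cases h : p a <;> simp [h, ih]

theorem pvRolls_eq (grid : List (List String)) :
    pvRolls grid =
      (PySem.List.pyRange 0 ((PySem.List.pyGetD grid 0 []).length : Int) 1).flatMap (fun x =>
        ((PySem.List.pyRange 0 (grid.length : Int) 1).filter
            (fun y => decide (pvP grid (x, y)))).map (fun y => (x, y))) := by
  unfold pvRolls
  congr 1
  funext x
  exact pvFilterIfMap (fun y => pvP grid (x, y)) (fun y => (x, y)) _

theorem pvRolls_mem (grid : List (List String)) (q : Int × Int) :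
    q ∈ pvRolls grid ↔ 0 ≤ q.1 ∧ q.1 < ((PySem.List.pyGetD grid 0 []).length : Int) ∧
      0 ≤ q.2 ∧ q.2 < (grid.length : Int) ∧ pvP grid q := by
  rw [pvRolls_eq]
  constructor
  · intro hq
    obtain ⟨x, hx, hq2⟩ := List.mem_flatMap.mp hq
    obtain ⟨y, hy, rfl⟩ := List.mem_map.mp hq2
    obtain ⟨hyr, hpd⟩ := List.mem_filter.mp hy
    exact ⟨(PySem.List.mem_pyRange_one.mp hx).1, (PySem.List.mem_pyRange_one.mp hx).2,
      (PySem.List.mem_pyRange_one.mp hyr).1, (PySem.List.mem_pyRange_one.mp hyr).2,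
      of_decide_eq_true hpd⟩
  · rintro ⟨h1, h2, h3, h4, h5⟩
    exact List.mem_flatMap.mpr ⟨q.1, PySem.List.mem_pyRange_one.mpr ⟨h1, h2⟩,
      List.mem_map.mpr ⟨q.2, List.mem_filter.mpr
        ⟨PySem.List.mem_pyRange_one.mpr ⟨h3, h4⟩, decide_eq_true h5⟩, rfl⟩⟩

theorem pvRolls_nodup (grid : List (List String)) : (pvRolls grid).Nodup := by
  rw [pvRolls_eq, List.nodup_flatMap]
  constructor
  · intro x _
    exact ((PySem.List.nodup_pyRange_one 0 _).filter _).map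
      (fun a b h => (Prod.ext_iff.mp h).2)
  · apply List.Pairwise.imp ?_ (PySem.List.pairwise_lt_pyRange_one 0 _)
    intro x x' hlt q hq hq'
    obtain ⟨y, _, rfl⟩ := List.mem_map.mp hq
    obtain ⟨y', _, heq⟩ := List.mem_map.mp hq'
    have := (Prod.ext_iff.mp heq).1
    simp only at this
    omega

theorem pvIz_iff (grid : List (List String))
    (hrow : ∀ row ∈ grid, (PySem.List.pyGetD grid 0 []).length ≤ row.length) (q : Int × Int) :
    index_or_zero q.1 q.2 grid = "@" ↔ q ∈ pvRolls grid := by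
  unfold index_or_zero
  split_ifs with hin
  · obtain ⟨hy0, hyh, hx0, hxw⟩ := hin
    have hq2 : q.2.toNat < grid.length := by omega
    have hrowmem := hrow (grid[q.2.toNat]) (List.getElem_mem hq2)
    rw [PySem.List.pyGetD_eq_getElem grid [] hy0 hyh,
      PySem.List.pyGetD_eq_getElem _ "." hx0 (by omega)]
    rw [pvRolls_mem]
    unfold pvP
    rw [PySem.List.pyGetD_eq_getElem grid [] hy0 hyh,
      PySem.List.pyGetD_eq_getElem _ "" hx0 (by omega)]
    constructor
    · intro hcell; exact ⟨hx0, hxw, hy0, hyh, hcell⟩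
    · intro h; exact h.2.2.2.2
  · rw [pvRolls_mem]
    constructor
    · intro h; exact absurd h (by decide)
    · rintro ⟨h1, h2, h3, h4, -⟩
      exact absurd ⟨h3, h4, h1, h2⟩ hin

theorem pvCount_swap (l₁ l₂ : List (Int × Int)) (h₁ : l₁.Nodup) (h₂ : l₂.Nodup) :
    l₁.countP (fun q => decide (q ∈ l₂)) = l₂.countP (fun q => decide (q ∈ l₁)) := by
  rw [List.countP_eq_length_filter, List.countP_eq_length_filter]
  apply List.Perm.length_eq
  rw [List.perm_ext_iff_of_nodup (h₁.filter _) (h₂.filter _)]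
  intro a
  simp only [List.mem_filter, decide_eq_true_eq]
  exact and_comm

theorem pvGather_eq (grid : List (List String))
    (hrow : ∀ row ∈ grid, (PySem.List.pyGetD grid 0 []).length ≤ row.length) (p : Int × Int) :
    get_surrounding_positions p.1 p.2 grid =
      (((pvRolls grid).countP (fun q => decide (max |q.1 - p.1| |q.2 - p.2| = (1 : Int)))) : Int) := by
  have h0 : get_surrounding_positions p.1 p.2 grid =
      (pvNbrs p).foldl (fun count pos =>
        if index_or_zero pos.1 pos.2 grid = "@" then count + 1 else count) 0 := rfl
  rw [h0, PySem.List.foldl_ite_add_one (fun pos : Int × Int => index_or_zero pos.1 pos.2 grid = "@"),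
    zero_add]
  congr 1
  calc (pvNbrs p).countP (fun q => decide (index_or_zero q.1 q.2 grid = "@"))
      = (pvNbrs p).countP (fun q => decide (q ∈ pvRolls grid)) :=
        List.countP_congr (fun q _ => by
          simp only [decide_eq_true_eq]; exact pvIz_iff grid hrow q)
    _ = (pvRolls grid).countP (fun q => decide (q ∈ pvNbrs p)) :=
        pvCount_swap _ _ (pvNbrs_nodup p) (pvRolls_nodup grid)
    _ = _ := List.countP_congr (fun q _ => by
          simp only [decide_eq_true_eq]; exact (pvAdj_iff p q).symm)

theorem pvFoldlEnumAux {α β : Type} (xs : List α) : ∀ (s : Int) (init : β) (g : β → Int → β),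
    (PySem.List.enumerate xs s).foldl (fun a p => g a p.1) init =
      (PySem.List.pyRange s (s + xs.length) 1).foldl g init := by
  induction xs with
  | nil =>
    intro s init g
    rw [PySem.List.enumerate_nil, PySem.List.pyRange_one_eq_nil (by simp)]
    rfl
  | cons x t ih =>
    intro s init g
    rw [PySem.List.enumerate_cons, PySem.List.pyRange_one_cons
      (show s < s + (((x :: t).length : Nat) : Int) by push_cast [List.length_cons]; omega)]
    rw [show s + (((x :: t).length : Nat) : Int) = (s + 1) + ((t.length : Nat) : Int) by
      push_cast [List.length_cons]; ring]
    exact ih (s + 1) (g init s) g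

theorem pvFoldlEnum {α β : Type} (xs : List α) (g : β → Int → β) (init : β) :
    (PySem.List.enumerate xs 0).foldl (fun a p => g a p.1) init =
      (PySem.List.pyRange 0 (xs.length : Int) 1).foldl g init := by
  rw [pvFoldlEnumAux xs 0 init g]
  norm_num

-- ===== VERDICT (by name: the statement is the Claim_ definition above) =====
theorem evaluate_grid_spec : Claim_equal_evaluate_grid := by
  intro grid _hdom hpre
  obtain ⟨hne, hrow⟩ := hpre
  unfold Spec_evaluate_grid
  -- A-side normal form
  have hA : evaluate_grid grid =
      ((PySem.List.pyRange 0 ((PySem.List.pyGetD grid 0 []).length : Int) 1).map (fun x =>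
        (((PySem.List.pyRange 0 (grid.length : Int) 1).countP (fun y =>
          decide (index_or_zero x y grid = "@" ∧ get_surrounding_positions x y grid < 4))) : Int))).sum := by
    unfold evaluate_grid
    rw [pvFoldlEnum (PySem.List.pyGetD grid 0 [])
      (fun count x => (PySem.List.enumerate grid 0).foldl (fun count yp =>
        if index_or_zero x yp.1 grid ≠ "@" then count
        else if get_surrounding_positions x yp.1 grid < 4 then count + 1 else count) count) 0]
    rw [PySem.List.foldl_congr_mem' _ _
      (fun count x => count + (((PySem.List.pyRange 0 (grid.length : Int) 1).countP (fun y =>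
        decide (index_or_zero x y grid = "@" ∧ get_surrounding_positions x y grid < 4))) : Int)) 0 ?_]
    · rw [PySem.List.foldl_add, zero_add]
    · intro x _ acc
      rw [pvFoldlEnum grid (fun count y =>
        if index_or_zero x y grid ≠ "@" then count
        else if get_surrounding_positions x y grid < 4 then count + 1 else count) acc]
      rw [PySem.List.foldl_congr_mem' _ _
        (fun count y => if index_or_zero x y grid = "@" ∧ get_surrounding_positions x y grid < 4
          then count + 1 else count) acc ?_]
      · rw [PySem.List.foldl_ite_add_one]
      · intro y _ c
        by_cases h1 : index_or_zero x y grid = "@" <;>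
          by_cases h2 : get_surrounding_positions x y grid < 4 <;> simp [h1, h2]
  -- B-side normal form
  have hin : ∀ p : Int × Int, (pvRolls grid).foldl (fun adjacent q =>
      if max |q.1 - p.1| |q.2 - p.2| = (1 : Int) then adjacent + 1 else adjacent) 0 =
      (((pvRolls grid).countP (fun q => decide (max |q.1 - p.1| |q.2 - p.2| = (1 : Int)))) : Int) :=
    fun p => by
      rw [PySem.List.foldl_ite_add_one (fun q : Int × Int => max |q.1 - p.1| |q.2 - p.2| = (1 : Int)),
        zero_add]
  have hB : evaluate_grid_alt grid =
      (((pvRolls grid).countP (fun p => decide (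
        (((pvRolls grid).countP (fun q => decide (max |q.1 - p.1| |q.2 - p.2| = (1 : Int)))) : Int) < 4))) : Int) := by
    show (pvRolls grid).foldl (fun count p =>
      if (pvRolls grid).foldl (fun adjacent q =>
            if max |q.1 - p.1| |q.2 - p.2| = (1 : Int) then adjacent + 1 else adjacent) (0 : Int) < 4
      then count + 1 else count) 0 = _
    simp only [hin]
    rw [PySem.List.foldl_ite_add_one (fun p : Int × Int =>
      (((pvRolls grid).countP (fun q => decide (max |q.1 - p.1| |q.2 - p.2| = (1 : Int)))) : Int) < 4),
      zero_add]
  have hsplit : ∀ pred : Int × Int → Bool, (pvRolls grid).countP pred =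
      ((PySem.List.pyRange 0 ((PySem.List.pyGetD grid 0 []).length : Int) 1).map (fun x =>
        (PySem.List.pyRange 0 (grid.length : Int) 1).countP
          (fun y => pred (x, y) && decide (pvP grid (x, y))))).sum := by
    intro pred
    rw [pvRolls_eq, List.countP_flatMap]
    simp only [Function.comp_def, List.countP_map, List.countP_filter]
  rw [hA, hB, hsplit, Nat.cast_list_sum, List.map_map]
  apply congrArg List.sum
  apply List.map_congr_left
  intro x hx
  obtain ⟨hx0, hxw⟩ := PySem.List.mem_pyRange_one.mp hx
  simp only [Function.comp_def]
  apply congrArg Nat.cast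
  apply List.countP_congr
  intro y hy
  obtain ⟨hy0, hyh⟩ := PySem.List.mem_pyRange_one.mp hy
  have hiz : index_or_zero x y grid = "@" ↔ (x, y) ∈ pvRolls grid := pvIz_iff grid hrow (x, y)
  have hmem : (x, y) ∈ pvRolls grid ↔ 0 ≤ x ∧ x < ((PySem.List.pyGetD grid 0 []).length : Int) ∧
      0 ≤ y ∧ y < (grid.length : Int) ∧ pvP grid (x, y) := pvRolls_mem grid (x, y)
  have hg : get_surrounding_positions x y grid =
      (((pvRolls grid).countP (fun q => decide (max |q.1 - x| |q.2 - y| = (1 : Int)))) : Int) :=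
    pvGather_eq grid hrow (x, y)
  simp only [decide_eq_true_eq, Bool.and_eq_true]
  constructor
  · rintro ⟨h1, h2⟩
    rw [hg] at h2
    exact ⟨h2, (hmem.mp (hiz.mp h1)).2.2.2.2⟩
  · rintro ⟨h2, hp⟩
    rw [← hg] at h2
    exact ⟨hiz.mpr (hmem.mpr ⟨hx0, hxw, hy0, hyh, hp⟩), h2⟩
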